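-- pv_equiv track=rewrite | github.com/parvez2083/netlist-tracer | src/netlist_tracer/parsers/detect.py | _pick_format
-- ===== SOURCE A (Python) =====
-- from typing import Optional
--
-- def _pick_format(scores: dict[str, int], ext_hint: Optional[str]) -> str:
--     """Apply tiebreaker logic to scores + extension hint.
--
--     Implements priority rules:
--     1. CDL wins if cdl score > 0 and spice score > 0 (CDL is superset)
--     2. Verilog wins if verilog >= spice (module is unambiguous)
--     3. Format with max score wins; ties use extension hint
--     4. Zero scores fall back to extension hint
--     5. Final fallback: 'spice' (legacy default)
--
--     Inputs:
--         scores: Dict from _score_content()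
--         ext_hint: Format name from _extension_hint() or None
--
--     Outputs:
--         Format name string ('spice', 'cdl', 'spectre', 'verilog', 'edif')
--     """
--     # Rule 1: CDL vs SPICE tiebreaker (both have markers, CDL is superset)
--     if scores["cdl"] > 0 and scores["spice"] > 0:
--         return "cdl"
--
--     # Rule 2: Verilog vs SPICE tiebreaker (both present, module is unambiguous)
--     if scores["verilog"] > 0 and scores["spice"] > 0 and scores["verilog"] >= scores["spice"]:
--         return "verilog"
--
--     # Find maximum score
--     max_score = max(scores.values())
--
--     # Rule 3: If max score is 0, use extension hint
--     if max_score == 0: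
--         if ext_hint:
--             return ext_hint
--         return "spice"
--
--     # Find all formats with max score (ties)
--     tied_formats = [fmt for fmt, score in scores.items() if score == max_score]
--
--     # Rule 4a: Single clear winner
--     if len(tied_formats) == 1:
--         return tied_formats[0]
--
--     # Rule 4b: Tie -- use extension hint if it matches one of the tied formats
--     if ext_hint and ext_hint in tied_formats:
--         return ext_hint
--
--     # Rule 4c: Tie with no matching extension hint -- pick by priority
--     priority = ["edif", "spectre", "verilog", "cdl", "spf", "spice"]
--     for fmt in priority:
--         if fmt in tied_formats:
--             return fmt
--
--     return "spice"
-- ===== SOURCE B (Python) =====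
-- from typing import Optional
--
-- _PRIORITY = ("edif", "spectre", "verilog", "cdl", "spf", "spice")
-- _RANK = {f: len(_PRIORITY) - i for i, f in enumerate(_PRIORITY)}  # edif=6 ... spice=1
--
--
-- def _pick_format(scores: dict[str, int], ext_hint: Optional[str]) -> str:
--     # Cross-format tiebreakers: CDL subsumes SPICE; a Verilog module is unambiguous.
--     if scores["cdl"] > 0 and scores["spice"] > 0:
--         return "cdl"
--     if scores["verilog"] > 0 and scores["spice"] > 0 and scores["verilog"] >= scores["spice"]:
--         return "verilog"
--
--     # Priority rank of a format: the extension hint beats everything, then the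
--     # fixed priority list; formats outside both rank lowest.
--     def rank(fmt: str) -> int:
--         if ext_hint and fmt == ext_hint:
--             return len(_PRIORITY) + 1
--         return _RANK.get(fmt, 0)
--
--     # One keyed pass: highest score wins; ties resolved by rank.
--     best, best_score = max(scores.items(), key=lambda kv: (kv[1], rank(kv[0])))
--
--     if best_score == 0:
--         return ext_hint if ext_hint else "spice"
--     return best
-- ===== Notes on version B (the rewrite author's own statement) =====
-- stated objective: alternative
-- what changed: A's explicit tied-list construction, extension-hint membership test and priority loop are replaced by a single keyed max over scores.items() with composite key (score, rank), where rank puts the extension hint above the fixed priority list and unknown formats below it; the zero-score fallback is read off the winning score.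
-- intended difference: On inputs where the nonzero maximum score is tied among two or more formats that are all outside the priority list and none matches the extension hint, A falls through its priority loop and returns 'spice' even though every tied format outscored spice; B returns the first top-scoring format, which is what rule 3 ('format with max score wins') intends. — e.g. on _pick_format([("cdl", 0), ("spice", 0), ("verilog", 0), ("aaa", 1), ("bbb", 1)], none): A returns "spice", B returns "aaa"
import Mathlib
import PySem

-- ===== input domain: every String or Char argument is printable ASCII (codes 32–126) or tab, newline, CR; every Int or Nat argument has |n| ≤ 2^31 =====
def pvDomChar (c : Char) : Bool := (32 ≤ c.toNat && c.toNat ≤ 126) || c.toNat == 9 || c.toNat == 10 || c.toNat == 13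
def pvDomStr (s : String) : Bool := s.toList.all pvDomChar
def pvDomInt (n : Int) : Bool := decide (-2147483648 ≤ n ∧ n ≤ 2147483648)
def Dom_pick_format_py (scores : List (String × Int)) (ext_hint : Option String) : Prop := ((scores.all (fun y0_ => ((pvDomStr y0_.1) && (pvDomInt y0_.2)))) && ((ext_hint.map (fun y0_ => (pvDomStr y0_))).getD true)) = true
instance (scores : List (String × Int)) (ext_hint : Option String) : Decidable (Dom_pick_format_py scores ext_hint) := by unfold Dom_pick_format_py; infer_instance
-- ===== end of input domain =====

-- B replaces A's tied-list construction, hint-membership test and priority loop by a single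
-- keyed max over the items (key = (score, rank), hint above the fixed priority list, unknown
-- formats below it); objective: alternative decomposition.  On ties among formats outside the
-- priority list A falls through to "spice"; B returns the top-scoring format (see D_ below).

-- Python truthiness of an Optional[str]
def pvTruthy (h : Option String) : Bool :=
  match h with
  | none => false
  | some s => !(s == "")

-- ===== PORT A =====
def pvPriority : List String := ["edif", "spectre", "verilog", "cdl", "spf", "spice"]

-- rules 3/4 of A, acting on the dict's items list (values = items.map (·.2))
def pvTailA (l : List (String × Int)) (eh : Option String) : String :=
  let max_score := (PySem.List.max? (l.map (fun p => p.2)) (fun v => v)).getD 0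
  if max_score = 0 then
    (if pvTruthy eh then eh.getD "" else "spice")
  else
    let tied := (l.filter (fun p => p.2 == max_score)).map (fun p => p.1)
    if tied.length = 1 then tied.headD "spice"
    else if pvTruthy eh ∧ (eh.getD "") ∈ tied then eh.getD ""
    else
      match pvPriority.find? (fun f => tied.contains f) with
      | some f => f
      | none => "spice"

def pick_format_py (scores : List (String × Int)) (ext_hint : Option String) : String :=
  let d := PySem.Dict.ofList scores
  if 0 < PySem.Dict.getD d "cdl" 0 ∧ 0 < PySem.Dict.getD d "spice" 0 then "cdl"
  else if 0 < PySem.Dict.getD d "verilog" 0 ∧ 0 < PySem.Dict.getD d "spice" 0 ∧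
      PySem.Dict.getD d "spice" 0 ≤ PySem.Dict.getD d "verilog" 0 then "verilog"
  else pvTailA (PySem.Dict.items d) ext_hint

-- ===== PORT B =====
-- _RANK = {f: len(_PRIORITY) - i for ...}: edif 6 ... spice 1
def pvRankTable : PySem.Dict String Int :=
  PySem.Dict.ofList [("edif", 6), ("spectre", 5), ("verilog", 4), ("cdl", 3), ("spf", 2), ("spice", 1)]

def pvRank (eh : Option String) (fmt : String) : Int :=
  if pvTruthy eh ∧ some fmt = eh then 7
  else PySem.Dict.getD pvRankTable fmt 0

-- the keyed max + final branches of B, acting on the dict's items list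
def pvTailB (l : List (String × Int)) (eh : Option String) : String :=
  match PySem.List.max2? l (fun kv => kv.2) (fun kv => pvRank eh kv.1) with
  | none => "spice"   -- unreachable under Pre_ (Python raises on an empty dict, as A does)
  | some best =>
    if best.2 = 0 then (if pvTruthy eh then eh.getD "" else "spice")
    else best.1

def pick_format_py_alt (scores : List (String × Int)) (ext_hint : Option String) : String :=
  let d := PySem.Dict.ofList scores
  if 0 < PySem.Dict.getD d "cdl" 0 ∧ 0 < PySem.Dict.getD d "spice" 0 then "cdl"
  else if 0 < PySem.Dict.getD d "verilog" 0 ∧ 0 < PySem.Dict.getD d "spice" 0 ∧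
      PySem.Dict.getD d "spice" 0 ≤ PySem.Dict.getD d "verilog" 0 then "verilog"
  else pvTailB (PySem.Dict.items d) ext_hint

-- ===== PRECONDITION & SPEC =====
-- Pre_ excludes exactly the inputs where A raises a KeyError: "cdl" must be a key; "spice"
-- must be a key when it is looked up (cdl > 0, or verilog > 0 on the rule-2 path); "verilog"
-- must be a key whenever rule 1 does not return.  (max() then never sees an empty dict.)
def Pre_pick_format_py (scores : List (String × Int)) (ext_hint : Option String) : Prop :=
  (PySem.Dict.get? (PySem.Dict.ofList scores) "cdl").isSome = true ∧
  (0 < (PySem.Dict.get? (PySem.Dict.ofList scores) "cdl").getD 0 →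
    (PySem.Dict.get? (PySem.Dict.ofList scores) "spice").isSome = true) ∧
  (¬ (0 < (PySem.Dict.get? (PySem.Dict.ofList scores) "cdl").getD 0 ∧
      0 < (PySem.Dict.get? (PySem.Dict.ofList scores) "spice").getD 0) →
    (PySem.Dict.get? (PySem.Dict.ofList scores) "verilog").isSome = true ∧
    (0 < (PySem.Dict.get? (PySem.Dict.ofList scores) "verilog").getD 0 →
      (PySem.Dict.get? (PySem.Dict.ofList scores) "spice").isSome = true))

instance (scores : List (String × Int)) (ext_hint : Option String) : Decidable (Pre_pick_format_py scores ext_hint) := by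
  unfold Pre_pick_format_py; infer_instance

def pvWitness_pick_format_py : (List (String × Int)) × Option String :=
  ([("cdl", 0), ("spice", 0), ("verilog", 0)], none)

-- On a nonzero-score tie confined to formats OUTSIDE the known priority list (and not matching
-- the extension hint), A falls through its priority loop and returns "spice" although every tied
-- format outscored spice; B returns the first top-scoring format, which is what rule 3
-- ("format with max score wins") intends.
def pvDtail (l : List (String × Int)) (eh : Option String) : Prop :=
  ∃ p ∈ l, ∃ q ∈ l, p.1 ≠ q.1 ∧ p.2 = q.2 ∧ p.2 ≠ 0 ∧
    ∀ r ∈ l, r.2 ≤ p.2 ∧ (r.2 = p.2 → r.1 ∉ pvPriority ∧ ¬ (eh = some r.1 ∧ r.1 ≠ ""))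

def D_pick_format_py (scores : List (String × Int)) (ext_hint : Option String) : Prop :=
  (PySem.Dict.getD (PySem.Dict.ofList scores) "spice" 0 ≤ 0 ∨
   (PySem.Dict.getD (PySem.Dict.ofList scores) "cdl" 0 ≤ 0 ∧
    PySem.Dict.getD (PySem.Dict.ofList scores) "verilog" 0 < PySem.Dict.getD (PySem.Dict.ofList scores) "spice" 0)) ∧
  pvDtail (PySem.Dict.items (PySem.Dict.ofList scores)) ext_hint

instance (scores : List (String × Int)) (ext_hint : Option String) : Decidable (D_pick_format_py scores ext_hint) := by
  unfold D_pick_format_py pvDtail; infer_instance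

def Spec_pick_format_py (scores : List (String × Int)) (ext_hint : Option String) (out : String) : Prop := ¬ D_pick_format_py scores ext_hint → out = pick_format_py_alt scores ext_hint
instance (scores : List (String × Int)) (ext_hint : Option String) (out : String) : Decidable (Spec_pick_format_py scores ext_hint out) := by unfold Spec_pick_format_py; infer_instance

def pvDiffWitness_pick_format_py : (List (String × Int)) × Option String :=
  ([("cdl", 0), ("spice", 0), ("verilog", 0), ("aaa", 1), ("bbb", 1)], none)

def pvDiffWitnessOut_pick_format_py : String × String := ("spice", "aaa")

-- ===== CLAIM (what is proved, stated in full; the proofs are below) =====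
def Claim_unchanged_pick_format_py : Prop := ∀ (scores : List (String × Int)) (ext_hint : Option String), Dom_pick_format_py scores ext_hint → Pre_pick_format_py scores ext_hint → Spec_pick_format_py scores ext_hint (pick_format_py scores ext_hint)
def Claim_changed_pick_format_py : Prop := Dom_pick_format_py (pvDiffWitness_pick_format_py.1) (pvDiffWitness_pick_format_py.2) ∧ Pre_pick_format_py (pvDiffWitness_pick_format_py.1) (pvDiffWitness_pick_format_py.2) ∧ D_pick_format_py (pvDiffWitness_pick_format_py.1) (pvDiffWitness_pick_format_py.2) ∧ pick_format_py (pvDiffWitness_pick_format_py.1) (pvDiffWitness_pick_format_py.2) = pvDiffWitnessOut_pick_format_py.1 ∧ pick_format_py_alt (pvDiffWitness_pick_format_py.1) (pvDiffWitness_pick_format_py.2) = pvDiffWitnessOut_pick_format_py.2 ∧ pvDiffWitnessOut_pick_format_py.1 ≠ pvDiffWitnessOut_pick_format_py.2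
def Claim_exact_pick_format_py : Prop := ∀ (scores : List (String × Int)) (ext_hint : Option String), Dom_pick_format_py scores ext_hint → Pre_pick_format_py scores ext_hint → D_pick_format_py scores ext_hint → pick_format_py scores ext_hint ≠ pick_format_py_alt scores ext_hint

-- ===== LEMMAS AND PROOFS =====

-- lexicographic "≤" on the composite key used by B
def pvLexLe (eh : Option String) (x b : String × Int) : Prop :=
  x.2 < b.2 ∨ (x.2 = b.2 ∧ pvRank eh x.1 ≤ pvRank eh b.1)

theorem pvLexLe_trans {eh : Option String} {x y z : String × Int}
    (h1 : pvLexLe eh x y) (h2 : pvLexLe eh y z) : pvLexLe eh x z := by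
  unfold pvLexLe at *; omega

-- the step function of B's keyed max (as PySem.List.max2? computes it)
def pvStep (eh : Option String) (acc : Option (String × Int)) (x : String × Int) : Option (String × Int) :=
  match acc with
  | none => some x
  | some c => if (decide (c.2 < x.2) || !decide (x.2 < c.2) && decide (pvRank eh c.1 < pvRank eh x.1)) = true
      then some x else some c

theorem pvMax2_eq_foldl (eh : Option String) (l : List (String × Int)) :
    PySem.List.max2? l (fun kv => kv.2) (fun kv => pvRank eh kv.1) = l.foldl (pvStep eh) none := by
  unfold PySem.List.max2?
  congr 1
  funext acc x
  cases acc <;> rfl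

-- the fold of B's keyed max, from an accumulator that is already some element
theorem pvMax2_aux (eh : Option String) (l : List (String × Int)) :
    ∀ m, ∃ b, List.foldl (pvStep eh) (some m) l = some b ∧
      (b = m ∨ b ∈ l) ∧ pvLexLe eh m b ∧ ∀ x ∈ l, pvLexLe eh x b := by
  induction l with
  | nil => exact fun m => ⟨m, rfl, Or.inl rfl, Or.inr ⟨rfl, le_refl _⟩, by simp⟩
  | cons y t ih =>
    intro m
    simp only [List.foldl, pvStep]
    by_cases hc : (decide (m.2 < y.2) || !decide (y.2 < m.2) && decide (pvRank eh m.1 < pvRank eh y.1)) = true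
    · rw [if_pos hc]
      obtain ⟨b, hb, hmem, hle, hall⟩ := ih y
      refine ⟨b, hb, ?_, ?_, ?_⟩
      · rcases hmem with h | h
        · exact Or.inr (h ▸ List.mem_cons_self)
        · exact Or.inr (List.mem_cons_of_mem _ h)
      · refine pvLexLe_trans ?_ hle
        simp only [Bool.or_eq_true, Bool.and_eq_true, Bool.not_eq_true', decide_eq_true_eq,
          decide_eq_false_iff_not] at hc
        unfold pvLexLe; omega
      · intro x hx
        rcases List.mem_cons.mp hx with h | h
        · exact h ▸ hle
        · exact hall x h
    · rw [if_neg hc]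
      obtain ⟨b, hb, hmem, hle, hall⟩ := ih m
      refine ⟨b, hb, ?_, hle, ?_⟩
      · rcases hmem with h | h
        · exact Or.inl h
        · exact Or.inr (List.mem_cons_of_mem _ h)
      · intro x hx
        rcases List.mem_cons.mp hx with h | h
        · refine pvLexLe_trans ?_ hle
          simp only [Bool.or_eq_true, Bool.and_eq_true, Bool.not_eq_true', decide_eq_true_eq,
            decide_eq_false_iff_not, not_or, not_and] at hc
          unfold pvLexLe
          subst h
          omega
        · exact hall x h

-- any result of B's keyed max is a member and a lex-maximum
theorem pvMax2_spec (eh : Option String) (l : List (String × Int)) (hl : l ≠ []) :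
    ∃ b, PySem.List.max2? l (fun kv => kv.2) (fun kv => pvRank eh kv.1) = some b ∧
      b ∈ l ∧ ∀ x ∈ l, pvLexLe eh x b := by
  cases l with
  | nil => exact absurd rfl hl
  | cons y t =>
    obtain ⟨b, hb, hmem, hle, hall⟩ := pvMax2_aux eh t y
    refine ⟨b, ?_, ?_, ?_⟩
    · rw [pvMax2_eq_foldl, List.foldl_cons]
      exact hb
    · rcases hmem with h | h
      · exact h ▸ List.mem_cons_self
      · exact List.mem_cons_of_mem _ h
    · intro x hx
      rcases List.mem_cons.mp hx with h | h
      · exact h ▸ hle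
      · exact hall x h

-- combined: B's keyed max returns an element carrying the plain maximum score
theorem pvBest_spec (eh : Option String) (l : List (String × Int)) (hl : l ≠ []) :
    ∃ b m, PySem.List.max? (l.map (fun p => p.2)) (fun v => v) = some m ∧
      PySem.List.max2? l (fun kv => kv.2) (fun kv => pvRank eh kv.1) = some b ∧
      b ∈ l ∧ b.2 = m ∧ ∀ x ∈ l, pvLexLe eh x b := by
  obtain ⟨b, hmax2, hbmem, hblex⟩ := pvMax2_spec eh l hl
  have hvne : l.map (fun p => p.2) ≠ [] := fun h => hl (List.map_eq_nil_iff.mp h)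
  obtain ⟨m, hm⟩ : ∃ m, PySem.List.max? (l.map (fun p => p.2)) (fun v => v) = some m := by
    cases h : PySem.List.max? (l.map (fun p => p.2)) (fun v => v) with
    | none => exact absurd ((PySem.List.max?_eq_none_iff _ _).mp h) hvne
    | some m => exact ⟨m, rfl⟩
  have hmaxv : ∀ v ∈ l.map (fun p => p.2), v ≤ m := fun v hv => PySem.List.max?_isMax hm v hv
  have hb2 : b.2 = m := by
    have h1 : b.2 ≤ m := hmaxv _ (by exact List.mem_map_of_mem hbmem)
    obtain ⟨w, hwl, hw2⟩ := List.mem_map.mp (PySem.List.max?_mem hm)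
    have h2 := hblex w hwl
    unfold pvLexLe at h2
    omega
  exact ⟨b, m, hm, hmax2, hbmem, hb2, hblex⟩

-- getD on the literal rank table, as an if-chain
theorem pvRankTable_getD (x : String) :
    PySem.Dict.getD pvRankTable x 0 =
      (if x = "edif" then 6 else if x = "spectre" then 5 else if x = "verilog" then 4
       else if x = "cdl" then 3 else if x = "spf" then 2 else if x = "spice" then 1 else 0) := by
  have h : pvRankTable = PySem.Dict.mk
      [("edif", 6), ("spectre", 5), ("verilog", 4), ("cdl", 3), ("spf", 2), ("spice", 1)] := by
    decide
  rw [h]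
  simp only [PySem.Dict.getD, PySem.Dict.get?_mk_cons, beq_iff_eq]
  by_cases h1 : x = "edif" <;> by_cases h2 : x = "spectre" <;> by_cases h3 : x = "verilog" <;>
    by_cases h4 : x = "cdl" <;> by_cases h5 : x = "spf" <;> by_cases h6 : x = "spice" <;>
    simp [h1, h2, h3, h4, h5, h6, eq_comm, PySem.Dict.get?]

-- the table rank is at most 6
theorem pvRankd_le_six (x : String) : PySem.Dict.getD pvRankTable x 0 ≤ 6 := by
  rw [pvRankTable_getD]; split_ifs <;> norm_num

-- a format on the priority list has positive table rank
theorem pvRankd_pos_of_mem (f : String)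
    (hf : f ∈ pvPriority) :
    0 < PySem.Dict.getD pvRankTable f 0 := by
  rw [pvRankTable_getD]
  simp only [pvPriority, List.mem_cons, List.not_mem_nil, or_false] at hf
  rcases hf with h | h | h | h | h | h <;> subst h <;> decide

-- A's priority loop equals: the tied format with maximal table rank if that rank is positive, else "spice"
theorem pvFind_priority (tied : List String) (b : String) (hbt : b ∈ tied)
    (hmax : ∀ s ∈ tied, PySem.Dict.getD pvRankTable s 0 ≤ PySem.Dict.getD pvRankTable b 0) :
    (match pvPriority.find? (fun f => tied.contains f) with
      | some f => f
      | none => "spice") =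
    (if 0 < PySem.Dict.getD pvRankTable b 0 then b else "spice") := by
  by_cases e1 : tied.contains "edif"
  · have hmem : "edif" ∈ tied := List.mem_of_elem_eq_true e1
    have h6 : (6:Int) ≤ PySem.Dict.getD pvRankTable b 0 := by
      have h := hmax _ hmem
      rwa [show PySem.Dict.getD pvRankTable "edif" 0 = 6 from by rw [pvRankTable_getD]; simp] at h
    have hb : b = "edif" := by
      rw [pvRankTable_getD] at h6
      split_ifs at h6 with hb1 hb2 hb3 hb4 hb5 hb6
      · exact hb1
      · omega
      · omega
      · omega
      · omega
      · omega
      · omega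
    subst hb
    simp [pvPriority, List.find?, hmem, pvRankTable_getD]
  ·
    by_cases e2 : tied.contains "spectre"
    · have hmem : "spectre" ∈ tied := List.mem_of_elem_eq_true e2
      have nm1 : "edif" ∉ tied := fun h => e1 (List.elem_eq_true_of_mem h)
      have h6 : (5:Int) ≤ PySem.Dict.getD pvRankTable b 0 := by
        have h := hmax _ hmem
        rwa [show PySem.Dict.getD pvRankTable "spectre" 0 = 5 from by rw [pvRankTable_getD]; simp] at h
      have hb : b = "spectre" := by
        rw [pvRankTable_getD] at h6
        split_ifs at h6 with hb1 hb2 hb3 hb4 hb5 hb6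
        · exfalso; rw [hb1] at hbt; exact nm1 hbt
        · exact hb2
        · omega
        · omega
        · omega
        · omega
        · omega
      subst hb
      simp [pvPriority, List.find?, nm1, hmem, pvRankTable_getD]
    ·
      by_cases e3 : tied.contains "verilog"
      · have hmem : "verilog" ∈ tied := List.mem_of_elem_eq_true e3
        have nm1 : "edif" ∉ tied := fun h => e1 (List.elem_eq_true_of_mem h)
        have nm2 : "spectre" ∉ tied := fun h => e2 (List.elem_eq_true_of_mem h)
        have h6 : (4:Int) ≤ PySem.Dict.getD pvRankTable b 0 := by
          have h := hmax _ hmem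
          rwa [show PySem.Dict.getD pvRankTable "verilog" 0 = 4 from by rw [pvRankTable_getD]; simp] at h
        have hb : b = "verilog" := by
          rw [pvRankTable_getD] at h6
          split_ifs at h6 with hb1 hb2 hb3 hb4 hb5 hb6
          · exfalso; rw [hb1] at hbt; exact nm1 hbt
          · exfalso; rw [hb2] at hbt; exact nm2 hbt
          · exact hb3
          · omega
          · omega
          · omega
          · omega
        subst hb
        simp [pvPriority, List.find?, nm1, nm2, hmem, pvRankTable_getD]
      ·
        by_cases e4 : tied.contains "cdl"
        · have hmem : "cdl" ∈ tied := List.mem_of_elem_eq_true e4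
          have nm1 : "edif" ∉ tied := fun h => e1 (List.elem_eq_true_of_mem h)
          have nm2 : "spectre" ∉ tied := fun h => e2 (List.elem_eq_true_of_mem h)
          have nm3 : "verilog" ∉ tied := fun h => e3 (List.elem_eq_true_of_mem h)
          have h6 : (3:Int) ≤ PySem.Dict.getD pvRankTable b 0 := by
            have h := hmax _ hmem
            rwa [show PySem.Dict.getD pvRankTable "cdl" 0 = 3 from by rw [pvRankTable_getD]; simp] at h
          have hb : b = "cdl" := by
            rw [pvRankTable_getD] at h6
            split_ifs at h6 with hb1 hb2 hb3 hb4 hb5 hb6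
            · exfalso; rw [hb1] at hbt; exact nm1 hbt
            · exfalso; rw [hb2] at hbt; exact nm2 hbt
            · exfalso; rw [hb3] at hbt; exact nm3 hbt
            · exact hb4
            · omega
            · omega
            · omega
          subst hb
          simp [pvPriority, List.find?, nm1, nm2, nm3, hmem, pvRankTable_getD]
        ·
          by_cases e5 : tied.contains "spf"
          · have hmem : "spf" ∈ tied := List.mem_of_elem_eq_true e5
            have nm1 : "edif" ∉ tied := fun h => e1 (List.elem_eq_true_of_mem h)
            have nm2 : "spectre" ∉ tied := fun h => e2 (List.elem_eq_true_of_mem h)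
            have nm3 : "verilog" ∉ tied := fun h => e3 (List.elem_eq_true_of_mem h)
            have nm4 : "cdl" ∉ tied := fun h => e4 (List.elem_eq_true_of_mem h)
            have h6 : (2:Int) ≤ PySem.Dict.getD pvRankTable b 0 := by
              have h := hmax _ hmem
              rwa [show PySem.Dict.getD pvRankTable "spf" 0 = 2 from by rw [pvRankTable_getD]; simp] at h
            have hb : b = "spf" := by
              rw [pvRankTable_getD] at h6
              split_ifs at h6 with hb1 hb2 hb3 hb4 hb5 hb6
              · exfalso; rw [hb1] at hbt; exact nm1 hbt
              · exfalso; rw [hb2] at hbt; exact nm2 hbt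
              · exfalso; rw [hb3] at hbt; exact nm3 hbt
              · exfalso; rw [hb4] at hbt; exact nm4 hbt
              · exact hb5
              · omega
              · omega
            subst hb
            simp [pvPriority, List.find?, nm1, nm2, nm3, nm4, hmem, pvRankTable_getD]
          ·
            by_cases e6 : tied.contains "spice"
            · have hmem : "spice" ∈ tied := List.mem_of_elem_eq_true e6
              have nm1 : "edif" ∉ tied := fun h => e1 (List.elem_eq_true_of_mem h)
              have nm2 : "spectre" ∉ tied := fun h => e2 (List.elem_eq_true_of_mem h)
              have nm3 : "verilog" ∉ tied := fun h => e3 (List.elem_eq_true_of_mem h)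
              have nm4 : "cdl" ∉ tied := fun h => e4 (List.elem_eq_true_of_mem h)
              have nm5 : "spf" ∉ tied := fun h => e5 (List.elem_eq_true_of_mem h)
              have h6 : (1:Int) ≤ PySem.Dict.getD pvRankTable b 0 := by
                have h := hmax _ hmem
                rwa [show PySem.Dict.getD pvRankTable "spice" 0 = 1 from by rw [pvRankTable_getD]; simp] at h
              have hb : b = "spice" := by
                rw [pvRankTable_getD] at h6
                split_ifs at h6 with hb1 hb2 hb3 hb4 hb5 hb6
                · exfalso; rw [hb1] at hbt; exact nm1 hbt
                · exfalso; rw [hb2] at hbt; exact nm2 hbt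
                · exfalso; rw [hb3] at hbt; exact nm3 hbt
                · exfalso; rw [hb4] at hbt; exact nm4 hbt
                · exfalso; rw [hb5] at hbt; exact nm5 hbt
                · exact hb6
                · omega
              subst hb
              simp [pvPriority, List.find?, nm1, nm2, nm3, nm4, nm5, hmem, pvRankTable_getD]
            · have nm1 : "edif" ∉ tied := fun h => e1 (List.elem_eq_true_of_mem h)
              have nm2 : "spectre" ∉ tied := fun h => e2 (List.elem_eq_true_of_mem h)
              have nm3 : "verilog" ∉ tied := fun h => e3 (List.elem_eq_true_of_mem h)
              have nm4 : "cdl" ∉ tied := fun h => e4 (List.elem_eq_true_of_mem h)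
              have nm5 : "spf" ∉ tied := fun h => e5 (List.elem_eq_true_of_mem h)
              have nm6 : "spice" ∉ tied := fun h => e6 (List.elem_eq_true_of_mem h)
              have hb0 : PySem.Dict.getD pvRankTable b 0 = 0 := by
                rw [pvRankTable_getD]
                split_ifs with hb1 hb2 hb3 hb4 hb5 hb6
                · exfalso; rw [hb1] at hbt; exact nm1 hbt
                · exfalso; rw [hb2] at hbt; exact nm2 hbt
                · exfalso; rw [hb3] at hbt; exact nm3 hbt
                · exfalso; rw [hb4] at hbt; exact nm4 hbt
                · exfalso; rw [hb5] at hbt; exact nm5 hbt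
                · exfalso; rw [hb6] at hbt; exact nm6 hbt
                · rfl
              rw [show pvPriority.find? (fun f => tied.contains f) = none from by
                simp [pvPriority, List.find?, nm1, nm2, nm3, nm4, nm5, nm6]]
              rw [if_neg (by simp [hb0])]

-- two distinct members force length at least 2
theorem pvTwo_le_length {α : Type} {xs : List α} {a b : α} (ha : a ∈ xs) (hb : b ∈ xs)
    (hne : a ≠ b) : 2 ≤ xs.length := by
  cases xs with
  | nil => cases ha
  | cons x t =>
    cases t with
    | nil =>
      simp only [List.mem_singleton] at ha hb
      exact absurd (ha.trans hb.symm) hne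
    | cons y u => simp only [List.length_cons]; omega

-- the tail computations agree on any nonempty items list (unique keys) outside the change region
theorem pvTail_eq (l : List (String × Int)) (eh : Option String) (hl : l ≠ [])
    (hk : (l.map (fun p => p.1)).Nodup)
    (hnd : ¬ pvDtail l eh) : pvTailA l eh = pvTailB l eh := by
  obtain ⟨best, m, hm, hmax2, hbmem, hb2, hblex⟩ := pvBest_spec eh l hl
  simp only [pvTailA, pvTailB]
  rw [hm, hmax2]
  simp only [Option.getD_some]
  by_cases hm0 : m = 0
  · rw [if_pos hm0, if_pos (show best.2 = 0 by omega)]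
  · rw [if_neg hm0, if_neg (show ¬ best.2 = 0 by omega)]
    have hbt : best.1 ∈ (l.filter (fun p => p.2 == m)).map (fun p => p.1) :=
      List.mem_map_of_mem (List.mem_filter.mpr ⟨hbmem, by simp [hb2]⟩)
    by_cases h1 : ((l.filter (fun p => p.2 == m)).map (fun p => p.1)).length = 1
    · rw [if_pos h1]
      obtain ⟨a, ha⟩ := List.length_eq_one_iff.mp h1
      have hba : best.1 = a := by rw [ha] at hbt; simpa using hbt
      rw [ha, hba]
      rfl
    · rw [if_neg h1]
      by_cases h2 : pvTruthy eh = true ∧ (eh.getD "") ∈ (l.filter (fun p => p.2 == m)).map (fun p => p.1)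
      · rw [if_pos h2]
        obtain ⟨ht, hmemT⟩ := h2
        obtain ⟨x, hxf, hx1⟩ := List.mem_map.mp hmemT
        obtain ⟨hxl, hx2b⟩ := List.mem_filter.mp hxf
        have hx2 : x.2 = m := by simpa using hx2b
        have hsome : some x.1 = eh := by
          cases eh with
          | none => simp [pvTruthy] at ht
          | some s => simp only [Option.getD_some] at hx1; rw [hx1]
        have hrx : pvRank eh x.1 = 7 := by
          unfold pvRank
          rw [if_pos ⟨ht, hsome⟩]
        have h7 : (7:Int) ≤ pvRank eh best.1 := by
          have h := hblex x hxl
          unfold pvLexLe at h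
          rw [hrx] at h
          omega
        have hco : pvTruthy eh = true ∧ some best.1 = eh := by
          unfold pvRank at h7
          split_ifs at h7 with hcond
          · exact hcond
          · exact absurd h7 (by have := pvRankd_le_six best.1; omega)
        cases eh with
        | none => exact absurd hco.2 (by simp)
        | some s =>
          have : best.1 = s := by have := hco.2; simpa [eq_comm] using this
          simp [this]
      · rw [if_neg h2]
        by_cases hall : ∀ f ∈ (l.filter (fun p => p.2 == m)).map (fun p => p.1), f ∉ pvPriority
        · -- all tied formats unknown: this is exactly the change region, contradicting hnd
          exfalso
          apply hnd
          have hfl2 : 2 ≤ (l.filter (fun p => p.2 == m)).length := by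
            have hp := List.length_pos_of_mem hbt
            rw [List.length_map] at hp h1
            omega
          rcases hflt : l.filter (fun p => p.2 == m) with _ | ⟨x0, _ | ⟨x1, rest⟩⟩
          · rw [hflt] at hfl2; simp at hfl2
          · rw [hflt] at hfl2; simp at hfl2
          · have hx0f : x0 ∈ l.filter (fun p => p.2 == m) := by rw [hflt]; exact List.mem_cons_self
            have hx1f : x1 ∈ l.filter (fun p => p.2 == m) := by
              rw [hflt]; exact List.mem_cons_of_mem _ List.mem_cons_self
            obtain ⟨hx0l, hx0b⟩ := List.mem_filter.mp hx0f
            obtain ⟨hx1l, hx1b⟩ := List.mem_filter.mp hx1f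
            have hx02 : x0.2 = m := by simpa using hx0b
            have hx12 : x1.2 = m := by simpa using hx1b
            have hne01 : x0.1 ≠ x1.1 := by
              have hsub : ((l.filter (fun p => p.2 == m)).map (fun p => p.1)).Sublist (l.map (fun p => p.1)) :=
                List.Sublist.map _ List.filter_sublist
              have hnd' := hk.sublist hsub
              rw [hflt] at hnd'
              simp only [List.map_cons, List.nodup_cons, List.mem_cons] at hnd'
              exact fun h => hnd'.1 (Or.inl h)
            refine ⟨x0, hx0l, x1, hx1l, hne01, by omega, by omega, ?_⟩
            intro r hrl
            refine ⟨by have : r.2 ≤ m := PySem.List.max?_isMax hm _ (List.mem_map_of_mem hrl); omega, ?_⟩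
            intro hr2
            have hrt : r.1 ∈ (l.filter (fun p => p.2 == m)).map (fun p => p.1) :=
              List.mem_map_of_mem (List.mem_filter.mpr ⟨hrl, by simp; omega⟩)
            refine ⟨hall r.1 hrt, ?_⟩
            rintro ⟨he, hne⟩
            exact h2 ⟨by simp [pvTruthy, he, hne], by rw [he]; simpa using hrt⟩
        · push_neg at hall
          obtain ⟨f, hf_t, hf_p⟩ := hall
          have hrt : ∀ s ∈ (l.filter (fun p => p.2 == m)).map (fun p => p.1),
              pvRank eh s = PySem.Dict.getD pvRankTable s 0 := by
            intro s hs
            unfold pvRank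
            rw [if_neg]
            rintro ⟨ht, hse⟩
            apply h2
            refine ⟨ht, ?_⟩
            cases eh with
            | none => cases hse
            | some u =>
              have : s = u := by simpa using hse
              simpa [← this] using hs
          have hmaxT : ∀ s ∈ (l.filter (fun p => p.2 == m)).map (fun p => p.1),
              PySem.Dict.getD pvRankTable s 0 ≤ PySem.Dict.getD pvRankTable best.1 0 := by
            intro s hs
            obtain ⟨x, hxf, hx1⟩ := List.mem_map.mp hs
            obtain ⟨hxl, hx2b⟩ := List.mem_filter.mp hxf
            have hx2 : x.2 = m := by simpa using hx2b
            have h := hblex x hxl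
            unfold pvLexLe at h
            have hr : pvRank eh x.1 ≤ pvRank eh best.1 := by omega
            rw [← hrt s hs, ← hrt best.1 hbt]
            exact hx1 ▸ hr
          rw [pvFind_priority _ best.1 hbt hmaxT]
          have hpos : 0 < PySem.Dict.getD pvRankTable best.1 0 :=
            lt_of_lt_of_le (pvRankd_pos_of_mem f hf_p) (hmaxT f hf_t)
          rw [if_pos hpos]

-- inside the change region A's tail returns "spice" while B's returns a tied format off the list
theorem pvTail_ne (l : List (String × Int)) (eh : Option String) (hl : l ≠ [])
    (hd : pvDtail l eh) : pvTailA l eh ≠ pvTailB l eh := by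
  obtain ⟨best, m, hm, hmax2, hbmem, hb2, hblex⟩ := pvBest_spec eh l hl
  obtain ⟨p, hpl, q, hql, hpq, hpq2, hp0, hpq3⟩ := hd
  have hpmax : ∀ r ∈ l, r.2 ≤ p.2 := fun r hr => (hpq3 r hr).1
  have hlast : ∀ r ∈ l, r.2 = p.2 → r.1 ∉ pvPriority ∧ ¬ (eh = some r.1 ∧ r.1 ≠ "") :=
    fun r hr h2 => (hpq3 r hr).2 h2
  have hpm : p.2 = m := by
    have h1 : p.2 ≤ m := PySem.List.max?_isMax hm _ (List.mem_map_of_mem hpl)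
    obtain ⟨w, hwl, hw2⟩ := List.mem_map.mp (PySem.List.max?_mem hm)
    have h2 := hpmax w hwl
    omega
  simp only [pvTailA, pvTailB]
  rw [hm, hmax2]
  simp only [Option.getD_some]
  rw [if_neg (show ¬ m = 0 by omega), if_neg (show ¬ best.2 = 0 by omega)]
  have hptied : p.1 ∈ (l.filter (fun r => r.2 == m)).map (fun r => r.1) :=
    List.mem_map_of_mem (List.mem_filter.mpr ⟨hpl, by simp [hpm]⟩)
  have hqtied : q.1 ∈ (l.filter (fun r => r.2 == m)).map (fun r => r.1) :=
    List.mem_map_of_mem (List.mem_filter.mpr ⟨hql, by simp; omega⟩)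
  rw [if_neg (show ¬ ((l.filter (fun r => r.2 == m)).map (fun r => r.1)).length = 1 by
    have := pvTwo_le_length hptied hqtied hpq
    omega)]
  rw [if_neg (show ¬ (pvTruthy eh = true ∧ (eh.getD "") ∈ (l.filter (fun r => r.2 == m)).map (fun r => r.1)) by
    rintro ⟨ht, hmem⟩
    obtain ⟨r, hrf, hr1⟩ := List.mem_map.mp hmem
    obtain ⟨hrl, hr2b⟩ := List.mem_filter.mp hrf
    have hr2 : r.2 = p.2 := by simp at hr2b; omega
    apply (hlast r hrl hr2).2
    cases eh with
    | none => simp [pvTruthy] at ht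
    | some s =>
      simp only [Option.getD_some] at hr1
      refine ⟨by rw [hr1], ?_⟩
      rw [hr1]
      simpa [pvTruthy] using ht)]
  have hnone : pvPriority.find? (fun f => ((l.filter (fun r => r.2 == m)).map (fun r => r.1)).contains f) = none := by
    rw [List.find?_eq_none]
    intro f hf
    simp only [List.contains_eq_mem, decide_eq_true_eq]
    intro hmem
    obtain ⟨r, hrf, hr1⟩ := List.mem_map.mp hmem
    obtain ⟨hrl, hr2b⟩ := List.mem_filter.mp hrf
    have hr2 : r.2 = p.2 := by simp at hr2b; omega
    exact (hlast r hrl hr2).1 (hr1 ▸ hf)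
  rw [hnone]
  have hb1 : best.1 ∉ pvPriority := (hlast best hbmem (by omega)).1
  exact fun h => hb1 (h ▸ (by decide : "spice" ∈ pvPriority))

-- under Pre_ the items list is nonempty
theorem pvItems_ne (scores : List (String × Int)) (ext_hint : Option String)
    (hpre : Pre_pick_format_py scores ext_hint) :
    PySem.Dict.items (PySem.Dict.ofList scores) ≠ [] := by
  obtain ⟨hC, -, -⟩ := hpre
  intro hnil
  simp [PySem.Dict.get?, hnil] at hC

-- ===== VERDICT (by name: the statements are the Claim_ definitions above) =====
theorem pick_format_py_spec : Claim_unchanged_pick_format_py := by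
  intro scores ext_hint _hdom hpre
  unfold Spec_pick_format_py
  intro hnd
  have hne := pvItems_ne scores ext_hint hpre
  simp only [pick_format_py, pick_format_py_alt]
  split_ifs with h1 h2
  · rfl
  · rfl
  · have hk : ((PySem.Dict.items (PySem.Dict.ofList scores)).map (fun p => p.1)).Nodup := by
      have h := PySem.Dict.nodup_keys_ofList (κ := String) (ν := Int) scores
      simpa [PySem.Dict.keys] using h
    refine pvTail_eq _ ext_hint hne hk (fun hc => hnd ⟨?_, hc⟩)
    omega

theorem pick_format_py_changed : Claim_changed_pick_format_py := by
  unfold Claim_changed_pick_format_py; decide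

theorem pick_format_py_tight : Claim_exact_pick_format_py := by
  intro scores ext_hint _hdom hpre hd
  obtain ⟨hr, hdt⟩ := hd
  have hne := pvItems_ne scores ext_hint hpre
  have h1 : ¬ (0 < PySem.Dict.getD (PySem.Dict.ofList scores) "cdl" 0 ∧
      0 < PySem.Dict.getD (PySem.Dict.ofList scores) "spice" 0) := by omega
  have h2 : ¬ (0 < PySem.Dict.getD (PySem.Dict.ofList scores) "verilog" 0 ∧
      0 < PySem.Dict.getD (PySem.Dict.ofList scores) "spice" 0 ∧
      PySem.Dict.getD (PySem.Dict.ofList scores) "spice" 0 ≤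
        PySem.Dict.getD (PySem.Dict.ofList scores) "verilog" 0) := by omega
  simp only [pick_format_py, pick_format_py_alt]
  rw [if_neg h1, if_neg h2, if_neg h1, if_neg h2]
  exact pvTail_ne _ ext_hint hne hdt
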